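-- pv_equiv track=rewrite | github.com/mazhen18/ScrapyAccordingISBN | local_utils/data_check_utils.py | check_classfication
-- ===== SOURCE A (Python) =====
-- def check_classfication(classfication):
--
--     try:
--         class_list = classfication.split('>')
--         first_class = class_list[0]
--         element_list = []
--         result_list = []
--         for c in class_list:
--             if c == first_class and len(element_list) != 0:
--                 result_list.append('>'.join(element_list))
--                 element_list = []
--             element_list.append(c)
--         result_list.append('>'.join(element_list))
--         return '\n'.join(result_list)
--     except:
--         return ''
-- ===== SOURCE B (Python) =====
-- def check_classfication(classfication):
--     try:
--         parts = classfication.split('>')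
--         first = parts[0]
--         starts = [i for i, c in enumerate(parts) if c == first]
--         starts.append(len(parts))
--         return '\n'.join('>'.join(parts[a:b]) for a, b in zip(starts, starts[1:]))
--     except:
--         return ''
-- ===== Notes on version B (the rewrite author's own statement) =====
-- stated objective: alternative
-- what changed: Replaces A's single-pass running-accumulator flush loop with a two-phase decomposition: first compute the list of group-start indices (positions equal to the first segment) plus a sentinel, then build each group by slicing between consecutive boundaries.
import Mathlib
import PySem

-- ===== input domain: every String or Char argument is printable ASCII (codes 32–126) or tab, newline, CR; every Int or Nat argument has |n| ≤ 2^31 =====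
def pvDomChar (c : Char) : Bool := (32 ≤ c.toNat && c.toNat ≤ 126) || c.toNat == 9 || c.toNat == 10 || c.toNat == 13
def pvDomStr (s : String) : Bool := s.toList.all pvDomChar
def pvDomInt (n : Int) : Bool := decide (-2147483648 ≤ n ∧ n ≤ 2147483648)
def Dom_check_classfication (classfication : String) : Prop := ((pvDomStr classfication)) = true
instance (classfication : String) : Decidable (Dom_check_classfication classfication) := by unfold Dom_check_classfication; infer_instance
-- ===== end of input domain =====

-- B replaces A's running-accumulator flush loop by a two-phase decomposition: compute the
-- group-start indices first, then slice the parts list between consecutive boundaries (objective: alternative).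


-- ===== PORT A =====
-- the loop body of A's for-loop over class_list: state = (element_list, result_list)
def pvStepA (first_class : String) (acc : List String × List String) (c : String) :
    List String × List String :=
  if c == first_class && !(acc.1.length == 0) then
    ([c], acc.2 ++ [PySem.Str.join ">" acc.1])
  else
    (acc.1 ++ [c], acc.2)

def check_classfication (classfication : String) : String :=
  match PySem.Str.split? classfication ">" with
  | none => ""            -- bare except (unreachable: sep ≠ "")
  | some class_list =>
    match PySem.List.pyGet? class_list 0 with
    | none => ""          -- bare except catches the IndexError
    | some first_class =>
      let st := class_list.foldl (pvStepA first_class) ([], [])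
      PySem.Str.join "\n" (st.2 ++ [PySem.Str.join ">" st.1])

-- ===== PORT B =====
def check_classfication_alt (classfication : String) : String :=
  match PySem.Str.split? classfication ">" with
  | none => ""            -- bare except (unreachable: sep ≠ "")
  | some parts =>
    match PySem.List.pyGet? parts 0 with
    | none => ""          -- bare except catches the IndexError
    | some first =>
      let starts : List Int :=
        ((PySem.List.enumerate parts).filter (fun p => p.2 == first)).map (·.1)
      let starts := starts ++ [(parts.length : Int)]
      PySem.Str.join "\n"
        (((starts.zip (PySem.List.slice starts (some 1) none)).map
          (fun ab => PySem.Str.join ">" (PySem.List.slice parts (some ab.1) (some ab.2)))))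

-- ===== PRECONDITION & SPEC =====
def Spec_check_classfication (classfication : String) (out : String) : Prop := out = check_classfication_alt classfication
instance (classfication : String) (out : String) : Decidable (Spec_check_classfication classfication out) := by unfold Spec_check_classfication; infer_instance

-- ===== CLAIM (what is proved, stated in full; the proofs are below) =====
def Claim_equal_check_classfication : Prop := ∀ (classfication : String), Dom_check_classfication classfication → Spec_check_classfication classfication (check_classfication classfication)

-- ===== LEMMAS AND PROOFS =====

-- canonical grouping of the tail: pvG first rest = (segment of the still-open first group,
-- the remaining complete groups, each of the form first :: segment)
def pvG (first : String) : List String → List String × List (List String)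
  | [] => ([], [])
  | c :: cs =>
    let p := pvG first cs
    if c == first then ([], (first :: p.1) :: p.2) else (c :: p.1, p.2)

-- positions of `first` in a list
def pvIdx (first : String) : List String → List Nat
  | [] => []
  | c :: cs => if c == first then 0 :: (pvIdx first cs).map (· + 1) else (pvIdx first cs).map (· + 1)

-- slices of l between consecutive boundaries
def pvZipSlices (l : List String) (ss : List Nat) : List (List String) :=
  (ss.zip (ss.drop 1)).map (fun ab => PySem.List.slice l (some (ab.1 : Int)) (some (ab.2 : Int)))

theorem pvZipSlices_cons₂ (l : List String) (a b : Nat) (t : List Nat) :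
    pvZipSlices l (a :: b :: t) = PySem.List.slice l (some (a : Int)) (some (b : Int)) :: pvZipSlices l (b :: t) := by
  simp [pvZipSlices]

theorem pvZipSlices_shift (ss : List Nat) (p l : List String) :
    pvZipSlices (p ++ l) (ss.map (fun n => p.length + n)) = pvZipSlices l ss := by
  induction ss with
  | nil => simp [pvZipSlices]
  | cons a t ih =>
    cases t with
    | nil => simp [pvZipSlices]
    | cons b t' =>
      simp only [List.map_cons] at ih ⊢
      rw [pvZipSlices_cons₂, pvZipSlices_cons₂, ih]
      congr 1
      rw [PySem.List.slice_natCast, PySem.List.slice_natCast, List.drop_append,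
        List.drop_eq_nil_of_le (by omega), List.nil_append,
        Nat.add_sub_add_left, Nat.add_sub_cancel_left]

-- A-side: the flush loop computes the canonical groups
theorem pvLoopA (first : String) (rest : List String) (elem res : List String) (h : elem ≠ []) :
    (rest.foldl (pvStepA first) (elem, res)).2 ++
        [PySem.Str.join ">" (rest.foldl (pvStepA first) (elem, res)).1] =
      res ++ (PySem.Str.join ">" (elem ++ (pvG first rest).1)
              :: (pvG first rest).2.map (PySem.Str.join ">")) := by
  induction rest generalizing elem res with
  | nil => simp [pvG]
  | cons c cs ih =>
    have hlen : (elem.length == 0) = false := by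
      simp [List.length_eq_zero_iff]; exact h
    by_cases hc : (c == first) = true
    · have hcs : c = first := by exact eq_of_beq hc
      rw [List.foldl_cons,
        show pvStepA first (elem, res) c = ([c], res ++ [PySem.Str.join ">" elem]) by
          simp [pvStepA, hc, hlen]]
      rw [ih [c] _ (by simp)]
      simp [pvG, hcs, List.append_assoc]
    · have hc' : (c == first) = false := by simpa using hc
      rw [List.foldl_cons,
        show pvStepA first (elem, res) c = (elem ++ [c], res) by
          simp [pvStepA, hc']]
      rw [ih (elem ++ [c]) _ (by simp)]
      simp [pvG, hc', List.append_assoc]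

-- map bookkeeping for the boundary lists
theorem pvSuccList (X : List Nat) (m : Nat) :
    X.map (· + 1) ++ [m + 1] = (X ++ [m]).map (fun n => 1 + n) := by
  simp only [List.map_append, List.map_cons, List.map_nil]
  congr 1
  · simp only [List.map_inj_left]; intro a _; omega
  · simp only [List.cons.injEq, and_true]; omega

theorem pvMapComp (X : List Nat) (k : Nat) :
    (X.map (fun n => 1 + n)).map (fun n => k + n) = X.map (fun n => k + 1 + n) := by
  rw [List.map_map]
  simp only [List.map_inj_left, Function.comp_apply]; intro a _; omega

theorem pvMapShift (X : List Nat) (k : Nat) :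
    (0 :: X.map (fun n => 1 + n)).map (fun n => k + n) = k :: X.map (fun n => k + 1 + n) := by
  rw [List.map_cons, pvMapComp]
  norm_num

-- B-side boundary/slice phase equals the canonical groups
theorem pvSlices (first : String) (cs : List String) : ∀ (p : List String),
    pvZipSlices (p ++ cs) (0 :: (pvIdx first cs ++ [cs.length]).map (fun n => p.length + n)) =
      (p ++ (pvG first cs).1) :: (pvG first cs).2 := by
  induction cs with
  | nil =>
    intro p
    simp [pvZipSlices, pvIdx, pvG, PySem.List.slice_to_natCast]
  | cons c cs ih =>
    intro p
    by_cases hc : (c == first) = true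
    · have hcs : c = first := by exact eq_of_beq hc
      have hb : ((pvIdx first (c :: cs) ++ [(c :: cs).length]).map (fun n => p.length + n)) =
          p.length :: (pvIdx first cs ++ [cs.length]).map (fun n => p.length + 1 + n) := by
        have h1 : pvIdx first (c :: cs) = 0 :: (pvIdx first cs).map (· + 1) := by
          simp [pvIdx, hc]
        rw [h1, List.length_cons, List.cons_append, pvSuccList, List.map_cons, Nat.add_zero,
          pvMapComp]
      rw [hb, pvZipSlices_cons₂, ← pvMapShift, pvZipSlices_shift]
      have h2 : (pvIdx first cs ++ [cs.length]).map (fun n => 1 + n) =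
          (pvIdx first cs ++ [cs.length]).map (fun n => [c].length + n) := by
        simp
      rw [h2]
      have hI := ih [c]
      simp only [List.singleton_append] at hI
      rw [hI]
      have hhead : PySem.List.slice (p ++ c :: cs) (some ((0 : Nat) : Int)) (some ((p.length : Nat) : Int)) = p := by
        rw [PySem.List.slice_natCast]
        simp
      rw [hhead]
      simp [pvG, hcs]
    · have hc' : (c == first) = false := by simpa using hc
      have hb : ((pvIdx first (c :: cs) ++ [(c :: cs).length]).map (fun n => p.length + n)) =
          (pvIdx first cs ++ [cs.length]).map (fun n => (p ++ [c]).length + n) := by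
        have h1 : pvIdx first (c :: cs) = (pvIdx first cs).map (· + 1) := by
          simp [pvIdx, hc']
        rw [h1, List.length_cons, pvSuccList, pvMapComp]
        simp
      rw [hb]
      have h2 : p ++ c :: cs = (p ++ [c]) ++ cs := by simp
      rw [h2, ih (p ++ [c])]
      simp [pvG, hc', List.append_assoc]

-- enumerate-filter-map computes pvIdx (shifted by the start offset)
theorem pvEnumIdx (first : String) (l : List String) : ∀ (s : Int),
    (((PySem.List.enumerate l s).filter (fun p => p.2 == first)).map (·.1)) =
      (pvIdx first l).map (fun (n : Nat) => s + (n : Int)) := by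
  induction l with
  | nil => intro s; simp [PySem.List.enumerate_nil, pvIdx]
  | cons c cs ih =>
    intro s
    rw [PySem.List.enumerate_cons]
    by_cases hc : (c == first) = true
    · have h1 : pvIdx first (c :: cs) = 0 :: (pvIdx first cs).map (· + 1) := by
        simp [pvIdx, hc]
      rw [h1, List.filter_cons_of_pos (by simpa using hc)]
      simp only [List.map_cons, List.map_map, List.cons.injEq]
      refine ⟨by simp, ?_⟩
      rw [ih (s + 1)]
      simp only [List.map_inj_left, Function.comp_apply]
      intro a _; push_cast; omega
    · have hc' : (c == first) = false := by simpa using hc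
      have h1 : pvIdx first (c :: cs) = (pvIdx first cs).map (· + 1) := by
        simp [pvIdx, hc']
      rw [h1, List.filter_cons_of_neg (by simpa using hc'), ih (s + 1), List.map_map]
      simp only [List.map_inj_left, Function.comp_apply]
      intro a _; push_cast; omega

-- ===== VERDICT (by name: the statement is the Claim_ definition above) =====
theorem check_classfication_spec : Claim_equal_check_classfication := by
  unfold Claim_equal_check_classfication
  intro s _
  show check_classfication s = check_classfication_alt s
  unfold check_classfication check_classfication_alt
  cases hsp : PySem.Str.split? s ">" with
  | none => rfl
  | some parts =>
    cases parts with
    | nil => rfl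
    | cons hd tl =>
      dsimp only
      rw [PySem.List.pyGet?_zero_cons]
      simp only []
      -- A side: first loop step
      have hstep0 : pvStepA hd ([], []) hd = ([hd], []) := by
        simp [pvStepA]
      rw [List.foldl_cons, hstep0]
      rw [pvLoopA hd tl [hd] [] (by simp)]
      -- B side
      rw [pvEnumIdx hd (hd :: tl) 0]
      have hmap0 : (pvIdx hd (hd :: tl)).map (fun (n : Nat) => (0 : Int) + (n : Int)) =
          (pvIdx hd (hd :: tl)).map (fun (n : Nat) => (n : Int)) := by
        simp only [List.map_inj_left]; intro a _; omega
      rw [hmap0]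
      have hidx : pvIdx hd (hd :: tl) = 0 :: (pvIdx hd tl).map (· + 1) := by
        simp [pvIdx]
      rw [hidx]
      have hN : (0 :: (pvIdx hd tl).map (· + 1)).map (fun (n : Nat) => (n : Int)) ++
            [((hd :: tl).length : Int)] =
          (0 :: (pvIdx hd tl ++ [tl.length]).map (fun n => [hd].length + n)).map
            (fun (n : Nat) => (n : Int)) := by
        have h3 : (pvIdx hd tl ++ [tl.length]).map (fun n => [hd].length + n) =
            (pvIdx hd tl).map (· + 1) ++ [tl.length + 1] := by
          rw [pvSuccList]
          simp only [List.map_inj_left]; intro a _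
          simp
        rw [h3]
        simp
      rw [hN]
      set N : List Nat := 0 :: (pvIdx hd tl ++ [tl.length]).map (fun n => [hd].length + n)
        with hNdef
      rw [PySem.List.slice_from_one]
      have htail : (N.map (fun (n : Nat) => (n : Int))).tail =
          (N.drop 1).map (fun (n : Nat) => (n : Int)) := by
        cases N <;> simp
      rw [htail, List.zip_map, List.map_map]
      have hB : ((N.zip (N.drop 1)).map
            ((fun ab => PySem.Str.join ">" (PySem.List.slice (hd :: tl) (some ab.1) (some ab.2))) ∘
              Prod.map (fun (n : Nat) => (n : Int)) (fun (n : Nat) => (n : Int)))) =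
          (pvZipSlices (hd :: tl) N).map (PySem.Str.join ">") := by
        simp [pvZipSlices, List.map_map, Function.comp_def]
      rw [hB, hNdef]
      have hS := pvSlices hd tl [hd]
      simp only [List.singleton_append] at hS
      rw [hS]
      simp
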